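-- pv_equiv track=rewrite | github.com/AlanOgic/clorag | src/clorag/core/database.py | _prepare_fts_query
-- ===== SOURCE A (Python) =====
-- def _prepare_fts_query(query: str) -> str:
--     """Prepare a query string for FTS5.
--
--     Handles escaping and adds prefix matching for better UX.
--
--     Args:
--         query: Raw user query.
--
--     Returns:
--         FTS5-safe query string.
--     """
--     # Remove FTS5 special characters that could cause syntax errors
--     special_chars = ['"', "'", "(", ")", "*", ":", "^", "-", "+"]
--     clean_query = query
--     for char in special_chars:
--         clean_query = clean_query.replace(char, " ")
--
--     # Split into terms and add prefix matching
--     terms = clean_query.split()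
--     if not terms:
--         return '""'  # Empty query
--
--     # Add wildcard suffix to each term for prefix matching
--     # This allows "son" to match "Sony"
--     fts_terms = [f'"{term}"*' for term in terms if term]
--     return " OR ".join(fts_terms)
-- ===== SOURCE B (Python) =====
-- def _prepare_fts_query(query: str) -> str:
--     """Prepare a query string for FTS5 (single-pass scan instead of nine replace passes)."""
--     specials = set('"\'()*:^-+')
--     tokens = []
--     cur = []
--     for ch in query:
--         if ch in specials or ch.isspace():
--             if cur:
--                 tokens.append(''.join(cur))
--                 cur = []
--         else:
--             cur.append(ch)
--     if cur:
--         tokens.append(''.join(cur))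
--     if not tokens:
--         return '""'
--     return " OR ".join('"' + t + '"*' for t in tokens)
-- ===== Notes on version B (the rewrite author's own statement) =====
-- stated objective: alternative
-- what changed: One single pass over the characters accumulating token runs (splitting on specials and whitespace directly) replaces nine sequential full-string replace passes followed by a split pass; same asymptotic cost, but constant-factor slower in CPython since the replaces run in C.
import Mathlib
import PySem

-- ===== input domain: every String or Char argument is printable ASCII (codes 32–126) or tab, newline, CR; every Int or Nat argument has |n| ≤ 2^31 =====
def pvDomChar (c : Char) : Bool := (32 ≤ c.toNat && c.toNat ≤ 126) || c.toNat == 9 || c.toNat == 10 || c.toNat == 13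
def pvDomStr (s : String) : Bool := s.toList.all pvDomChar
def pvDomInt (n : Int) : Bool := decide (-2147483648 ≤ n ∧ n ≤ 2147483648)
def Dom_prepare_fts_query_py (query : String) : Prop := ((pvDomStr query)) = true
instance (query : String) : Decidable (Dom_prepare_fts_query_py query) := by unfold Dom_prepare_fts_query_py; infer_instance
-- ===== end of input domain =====

-- B replaces A's nine sequential replace passes + split with one single scan over the
-- characters accumulating token runs (alternative decomposition; same asymptotic cost).


-- ===== PORT A =====
-- special_chars = ['"', "'", "(", ")", "*", ":", "^", "-", "+"]
def pvSpecialsA : List Char := ['"', '\'', '(', ')', '*', ':', '^', '-', '+']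

-- literal port of A: fold the nine replaces, split on whitespace, decorate, join
def prepare_fts_query_py (query : String) : String :=
  let clean := pvSpecialsA.foldl (fun s c => PySem.Chars.replace s [c] [' ']) query.toList
  let terms := PySem.Chars.split₀ clean
  if terms.isEmpty then "\"\""
  else String.ofList (PySem.Chars.join " OR ".toList
    ((terms.filter (fun t => !t.isEmpty)).map (fun t => '"' :: t ++ ['"', '*'])))

-- ===== PORT B =====
-- specials = set('"\'()*:^-+')
def pvSpecialsB : PySem.Set Char := PySem.Set.ofList "\"'()*:^-+".toList

-- the body of B's for-loop: flush cur on a special/whitespace char, else extend cur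
def pvStepB (st : List (List Char) × List Char) (c : Char) : List (List Char) × List Char :=
  if pvSpecialsB.contains c || PySem.Chars.isspace c then
    (if st.2.isEmpty then st else (st.1 ++ [st.2], []))
  else (st.1, st.2 ++ [c])

-- literal port of B: one pass over the characters, then decorate and join
def prepare_fts_query_py_alt (query : String) : String :=
  let st := query.toList.foldl pvStepB ([], [])
  let tokens := if st.2.isEmpty then st.1 else st.1 ++ [st.2]
  if tokens.isEmpty then "\"\""
  else String.ofList (PySem.Chars.join " OR ".toList (tokens.map (fun t => '"' :: t ++ ['"', '*'])))

-- ===== PRECONDITION & SPEC =====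
def Spec_prepare_fts_query_py (query : String) (out : String) : Prop := out = prepare_fts_query_py_alt query
instance (query : String) (out : String) : Decidable (Spec_prepare_fts_query_py query out) := by unfold Spec_prepare_fts_query_py; infer_instance

-- ===== CLAIM (what is proved, stated in full; the proofs are below) =====
def Claim_equal_prepare_fts_query_py : Prop := ∀ (query : String), Dom_prepare_fts_query_py query → Spec_prepare_fts_query_py query (prepare_fts_query_py query)

-- ===== LEMMAS AND PROOFS =====

-- the per-character effect of all nine replaces together
def pvSubst (c : Char) : Char := if pvSpecialsB.contains c then ' ' else c

lemma pv_replace_go_single (c : Char) : ∀ (l acc : List Char) (fuel : Nat), l.length ≤ fuel →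
    PySem.Chars.replace.go [c] [' '] fuel l acc
      = acc.reverse ++ l.map (fun d => if d = c then ' ' else d) := by
  intro l
  induction l with
  | nil =>
    intro acc fuel _
    cases fuel <;> simp [PySem.Chars.replace.go]
  | cons d t ih =>
    intro acc fuel hf
    cases fuel with
    | zero => simp at hf
    | succ f =>
      by_cases h : c = d
      · subst h
        have hp : [c].isPrefixOf (c :: t) = true := by simp [List.isPrefixOf]
        simp only [PySem.Chars.replace.go, hp, if_true, List.length_cons, List.length_nil,
          List.drop_succ_cons, List.drop_zero, List.reverse_cons, List.reverse_nil,
          List.nil_append, List.singleton_append]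
        rw [ih (' ' :: acc) f (by simpa using hf)]
        simp
      · have hp : [c].isPrefixOf (d :: t) = false := by
          simpa [List.isPrefixOf] using h
        simp only [PySem.Chars.replace.go, hp, Bool.false_eq_true]
        rw [if_neg (by simp), ih (d :: acc) f (by simpa using hf)]
        simp [if_neg (fun h' : d = c => h h'.symm)]

lemma pv_replace_single (s : List Char) (c : Char) :
    PySem.Chars.replace s [c] [' '] = s.map (fun d => if d = c then ' ' else d) := by
  simp [PySem.Chars.replace, pv_replace_go_single c s [] s.length (le_refl _)]

lemma pv_foldl_maps (l : List Char) (hl : ' ' ∉ l) : ∀ (s : List Char),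
    l.foldl (fun s c => s.map (fun d => if d = c then ' ' else d)) s
      = s.map (fun d => if l.contains d then ' ' else d) := by
  induction l with
  | nil => intro s; simp
  | cons c t ih =>
    intro s
    have ht : ' ' ∉ t := fun h => hl (List.mem_cons_of_mem _ h)
    rw [List.foldl_cons, ih ht, List.map_map]
    apply List.map_congr_left
    intro d _
    by_cases h : d = c
    · subst h
      have h0 : t.contains ' ' = false := by simpa using ht
      simp [Function.comp]
    · have hcd : (c == d) = false := by
        simp only [beq_eq_false_iff_ne, ne_eq]
        exact fun h' => h h'.symm
      simp only [Function.comp, List.contains_cons]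
      simp [h]

lemma pv_specials_eq : pvSpecialsB = pvSpecialsA := by decide

lemma pv_clean_eq (s : List Char) :
    pvSpecialsA.foldl (fun s c => PySem.Chars.replace s [c] [' ']) s = s.map pvSubst := by
  simp only [pv_replace_single]
  rw [pv_foldl_maps pvSpecialsA (by decide) s]
  unfold pvSubst
  rw [pv_specials_eq]
  simp [PySem.Set.contains]

lemma pv_isspace_subst (c : Char) :
    PySem.Chars.isspace (pvSubst c) = (pvSpecialsB.contains c || PySem.Chars.isspace c) := by
  unfold pvSubst
  cases hb : pvSpecialsB.contains c
  · simp
  · simp; decide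

lemma pv_subst_of_not_special (c : Char) (h : pvSpecialsB.contains c = false) :
    pvSubst c = c := by unfold pvSubst; rw [if_neg (by simpa using h)]

lemma pv_scan_main : ∀ (s : List Char) (cur : List Char) (acc : List (List Char)),
    PySem.Chars.split₀.go (s.map pvSubst) cur acc =
      (let st := s.foldl pvStepB (acc.reverse, cur.reverse)
       if st.2.isEmpty then st.1 else st.1 ++ [st.2]) := by
  intro s
  induction s with
  | nil =>
    intro cur acc
    simp only [List.map_nil, PySem.Chars.split₀.go, List.foldl_nil]
    by_cases h : cur = []
    · subst h; simp
    · simp [h]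
  | cons c s ih =>
    intro cur acc
    simp only [List.map_cons, List.foldl_cons]
    by_cases hc : (pvSpecialsB.contains c || PySem.Chars.isspace c) = true
    · have hsp : PySem.Chars.isspace (pvSubst c) = true := by rw [pv_isspace_subst]; exact hc
      have hstepE : ∀ cur2 : List Char, cur2.isEmpty = true →
          pvStepB (acc.reverse, cur2) c = (acc.reverse, cur2) := by
        intro cur2 he
        unfold pvStepB
        rw [if_pos hc, if_pos he]
      have hstepN : ∀ cur2 : List Char, cur2.isEmpty = false →
          pvStepB (acc.reverse, cur2) c = (acc.reverse ++ [cur2], []) := by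
        intro cur2 he
        unfold pvStepB
        rw [if_pos hc, if_neg (by simp [he])]
      by_cases h : cur = []
      · subst h
        simp only [PySem.Chars.split₀.go, hsp, if_true, List.isEmpty_nil, List.reverse_nil]
        rw [hstepE [] List.isEmpty_nil, ih [] acc]
        simp
      · have h1 : cur.isEmpty = false := List.isEmpty_eq_false_iff.mpr h
        have h2 : cur.reverse.isEmpty = false := by simp [h]
        simp only [PySem.Chars.split₀.go, hsp, if_true, h1, Bool.false_eq_true, if_false]
        rw [hstepN cur.reverse h2, ih [] (cur.reverse :: acc)]
        simp
    · have hns : pvSpecialsB.contains c = false ∧ PySem.Chars.isspace c = false := by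
        simpa using hc
      have hcc : pvSubst c = c := pv_subst_of_not_special c hns.1
      rw [hcc]
      simp only [PySem.Chars.split₀.go, hns.2, Bool.false_eq_true, if_false]
      rw [ih (c :: cur) acc]
      unfold pvStepB
      rw [if_neg hc]
      simp

lemma pv_toks_ne_nil : ∀ (s : List Char) (toks : List (List Char)) (cur : List Char),
    (∀ t ∈ toks, t ≠ []) → ∀ t ∈ (s.foldl pvStepB (toks, cur)).1, t ≠ [] := by
  intro s
  induction s with
  | nil => intro toks cur h; simpa using h
  | cons c s ih =>
    intro toks cur h
    rw [List.foldl_cons]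
    unfold pvStepB
    by_cases hc : (pvSpecialsB.contains c || PySem.Chars.isspace c) = true
    · rw [if_pos hc]
      by_cases h2 : cur.isEmpty = true
      · rw [if_pos h2]
        exact ih toks cur h
      · rw [if_neg h2]
        refine ih _ _ ?_
        intro t ht
        rcases List.mem_append.mp ht with h' | h'
        · exact h t h'
        · simp only [List.mem_singleton] at h'
          subst h'
          exact List.isEmpty_eq_false_iff.mp (by simpa using h2)
    · rw [if_neg hc]
      exact ih toks _ h

-- ===== VERDICT (by name: the statement is the Claim_ definition above) =====
theorem prepare_fts_query_py_spec : Claim_equal_prepare_fts_query_py := by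
  intro query _
  unfold Spec_prepare_fts_query_py prepare_fts_query_py prepare_fts_query_py_alt
  simp only [pv_clean_eq, PySem.Chars.split₀]
  rw [pv_scan_main query.toList [] []]
  simp only [List.reverse_nil]
  set st := query.toList.foldl pvStepB ([], []) with hst
  have hne : ∀ t ∈ (if st.2.isEmpty then st.1 else st.1 ++ [st.2]), t ≠ [] := by
    intro t ht
    by_cases h2 : st.2.isEmpty = true
    · simp [h2] at ht
      exact pv_toks_ne_nil query.toList [] [] (by simp) t ht
    · simp [h2] at ht
      rcases ht with h' | h'
      · exact pv_toks_ne_nil query.toList [] [] (by simp) t h'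
      · subst h'
        exact List.isEmpty_eq_false_iff.mp (by simpa using h2)
  have hfilter : (if st.2.isEmpty then st.1 else st.1 ++ [st.2]).filter (fun t => !t.isEmpty)
      = (if st.2.isEmpty then st.1 else st.1 ++ [st.2]) := by
    apply List.filter_eq_self.mpr
    intro t ht
    simpa using List.isEmpty_eq_false_iff.mpr (hne t ht)
  rw [hfilter]
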